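-- pv_equiv track=rewrite | github.com/X-Dynamite-X/python-cipher | virnam.py | text_list_index
-- ===== SOURCE A (Python) =====
-- def text_list_index(plain_text):
--     letters = ["A","B","C","D","E","F","G","H","I","J","K","L","M","N","O","P","Q","R","S","T","U","V","W","X","Y","Z"]
--     list_text_indax=[]
--     text=""
--     for i in range(len(plain_text)):
--         for l in range(len(letters)):
--             if letters[l] == plain_text[i] :
--                 list_text_indax.append(l)
--     return list_text_indax
-- ===== SOURCE B (Python) =====
-- def text_list_index(plain_text):
--     # Divide and conquer: split the text in half, recurse, concatenate the
--     # two index lists; a single character is the base case.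
--     def go(s):
--         if len(s) == 0:
--             return []
--         if len(s) == 1:
--             c = s[0]
--             return [ord(c) - 65] if 'A' <= c <= 'Z' else []
--         mid = len(s) // 2
--         return go(s[:mid]) + go(s[mid:])
--     return go(plain_text)
-- ===== Notes on version B (the rewrite author's own statement) =====
-- stated objective: alternative
-- what changed: Replaces A's linear loop with a per-character scan of a 26-letter table by a divide-and-conquer recursion that splits the text in half and handles one character (via the closed-form index ord(c)-65) in the base case.
import Mathlib
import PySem

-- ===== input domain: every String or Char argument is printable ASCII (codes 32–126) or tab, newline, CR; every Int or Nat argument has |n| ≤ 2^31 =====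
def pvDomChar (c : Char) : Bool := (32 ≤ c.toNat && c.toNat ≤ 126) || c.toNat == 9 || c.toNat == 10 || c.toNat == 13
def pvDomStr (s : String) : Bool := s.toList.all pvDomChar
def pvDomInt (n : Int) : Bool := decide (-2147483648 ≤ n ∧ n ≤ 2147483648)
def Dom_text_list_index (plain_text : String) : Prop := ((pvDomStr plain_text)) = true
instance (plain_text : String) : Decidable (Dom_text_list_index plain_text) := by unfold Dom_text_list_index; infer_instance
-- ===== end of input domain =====

-- B replaces A's linear loop with inner 26-letter table scan by a divide-and-conquer
-- recursion (split in half, recurse, concatenate; base case = one character, closed-form index).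

-- ===== PORT A =====
-- the 26-letter table of A
def pvLetters : List Char :=
  ['A','B','C','D','E','F','G','H','I','J','K','L','M','N','O','P','Q','R','S','T','U','V','W','X','Y','Z']

def text_list_index (plain_text : String) : List Int :=
  plain_text.toList.foldl
    (fun acc c =>
      pvLetters.zipIdx.foldl
        (fun acc2 p => if p.1 == c then acc2 ++ [(p.2 : Int)] else acc2) acc)
    []

-- ===== PORT B =====
-- helper 'go' of Source B; s[:mid] / s[mid:] with 0 ≤ mid ≤ len are exactly take/drop
def pvGo : List Char → List Int
  | [] => []                                             -- len(s) == 0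
  | [c] => if 'A' ≤ c ∧ c ≤ 'Z' then [((c.toNat : Int) - 65)] else []   -- len(s) == 1
  | c1 :: c2 :: rest =>                                  -- len(s) ≥ 2: split at mid = len // 2
    let s := c1 :: c2 :: rest
    pvGo (s.take (s.length / 2)) ++ pvGo (s.drop (s.length / 2))
termination_by s => s.length
decreasing_by
  · simp only [List.length_take, List.length_cons]; omega
  · simp only [List.length_drop, List.length_cons]; omega

def text_list_index_alt (plain_text : String) : List Int :=
  pvGo plain_text.toList

-- ===== PRECONDITION & SPEC =====
def Spec_text_list_index (plain_text : String) (out : List Int) : Prop := out = text_list_index_alt plain_text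
instance (plain_text : String) (out : List Int) : Decidable (Spec_text_list_index plain_text out) := by unfold Spec_text_list_index; infer_instance

-- ===== CLAIM (what is proved, stated in full; the proofs are below) =====
def Claim_equal_text_list_index : Prop := ∀ (plain_text : String), Dom_text_list_index plain_text → Spec_text_list_index plain_text (text_list_index plain_text)

-- ===== LEMMAS AND PROOFS =====

-- the per-character contribution both versions produce
def pvMatch (c : Char) : List Int :=
  if 'A' ≤ c ∧ c ≤ 'Z' then [((c.toNat : Int) - 65)] else []

theorem pv_char_le_iff (c d : Char) : c ≤ d ↔ c.toNat ≤ d.toNat := by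
  rw [Char.le_def, UInt32.le_iff_toNat_le]; rfl

theorem pv_letters_range : ∀ x ∈ pvLetters, 65 ≤ x.toNat ∧ x.toNat ≤ 90 := by
  intro x hx
  fin_cases hx <;> exact ⟨by decide, by decide⟩

-- the matches of A's inner scan, as a function of the character alone
theorem pv_matches (c : Char) :
    ((pvLetters.zipIdx.filter (fun p => p.1 == c)).map (fun p => ((p.2 : Int)))) = pvMatch c := by
  unfold pvMatch
  by_cases h : 'A' ≤ c ∧ c ≤ 'Z'
  · rw [if_pos h]
    obtain ⟨h1, h2⟩ := h
    rw [pv_char_le_iff] at h1 h2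
    have hc : c = Char.ofNat c.toNat := (Char.ofNat_toNat c).symm
    have h1' : 65 ≤ c.toNat := h1
    have h2' : c.toNat ≤ 90 := h2
    set n := c.toNat with hn
    rw [hc]
    interval_cases n <;> decide
  · rw [if_neg h]
    rw [List.map_eq_nil_iff, List.filter_eq_nil_iff]
    rintro ⟨x, i⟩ hp
    simp only [beq_iff_eq]
    intro he
    apply h
    have hx : x ∈ pvLetters := by
      obtain ⟨-, hi, hx⟩ := List.mem_zipIdx hp
      rw [hx]
      exact List.getElem_mem _
    obtain ⟨hl, hu⟩ := pv_letters_range x hx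
    subst he
    exact ⟨(pv_char_le_iff 'A' x).mpr hl, (pv_char_le_iff x 'Z').mpr hu⟩

-- A computes the concatenation of the per-character matches
theorem pv_A_eq_flatMap (s : String) :
    text_list_index s = s.toList.flatMap pvMatch := by
  unfold text_list_index
  have hstep : ∀ (acc : List Int) (c : Char),
      pvLetters.zipIdx.foldl
          (fun acc2 p => if p.1 == c then acc2 ++ [(p.2 : Int)] else acc2) acc
        = acc ++ pvMatch c := by
    intro acc c
    rw [PySem.List.foldl_append_if (fun p : Char × Nat => p.1 == c)
        (fun p : Char × Nat => ((p.2 : Int))) pvLetters.zipIdx acc, pv_matches]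
  calc s.toList.foldl (fun acc c =>
          pvLetters.zipIdx.foldl
            (fun acc2 p => if p.1 == c then acc2 ++ [(p.2 : Int)] else acc2) acc) []
      = s.toList.foldl (fun acc c => acc ++ pvMatch c) [] :=
        PySem.List.foldl_congr_mem _ _ _ _ (fun acc c _ => hstep acc c)
    _ = s.toList.flatMap pvMatch := by
        rw [PySem.List.foldl_append_eq_flatMap]; simp

-- B's divide-and-conquer computes the same concatenation
theorem pv_go_eq_flatMap (s : List Char) : pvGo s = s.flatMap pvMatch := by
  induction s using pvGo.induct with
  | case1 => simp [pvGo]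
  | case2 c h => simp [pvGo, pvMatch, h]
  | case3 c h => simp [pvGo, pvMatch, h]
  | case4 c1 c2 rest s ih1 ih2 =>
      rw [pvGo, ih1, ih2, ← List.flatMap_append, List.take_append_drop]

-- ===== VERDICT (by name: the statement is the Claim_ definition above) =====
theorem text_list_index_spec : Claim_equal_text_list_index := by
  intro s _
  unfold Spec_text_list_index text_list_index_alt
  rw [pv_A_eq_flatMap, pv_go_eq_flatMap]
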